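-- pv_equiv track=rewrite | github.com/hexanna1/hex-study | pattern_enumeration.py | _min_delta_between
-- ===== SOURCE A (Python) =====
-- from typing import Iterable
--
-- Point = tuple[int, int]
--
-- def _delta(a: Point, b: Point) -> int:
--     dq = int(a[0]) - int(b[0])
--     dr = int(a[1]) - int(b[1])
--     return int(dq * dq + dq * dr + dr * dr)
--
-- def _min_delta_between(a_points: Iterable[Point], b_points: Iterable[Point]) -> int | None:
--     a_pts = tuple(a_points)
--     b_pts = tuple(b_points)
--     if not a_pts or not b_pts:
--         return None
--     best: int | None = None
--     for a in a_pts: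
--         for b in b_pts:
--             d = _delta(a, b)
--             best = d if best is None else min(best, d)
--     return best
-- ===== SOURCE B (Python) =====
-- def _bisect_left(us, u):
--     # standard binary search: first index i with us[i] >= u (us sorted)
--     lo, hi = 0, len(us)
--     while lo < hi:
--         mid = (lo + hi) // 2
--         if us[mid] < u:
--             lo = mid + 1
--         else:
--             hi = mid
--     return lo
--
--
-- def _scan(u, v, seq, best):
--     # seq is ordered by growing |u-gap|; once the u-gap alone already reaches
--     # best (4*delta so far), no later element of seq can improve the minimum.
--     for ub, vb in seq:
--         du = ub - u
--         if best is not None and du * du >= best: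
--             break
--         dv = vb - v
--         d4 = du * du + 3 * dv * dv
--         if best is None or d4 < best:
--             best = d4
--     return best
--
--
-- def _min_delta_between(a_points, b_points):
--     a_pts = list(a_points)
--     b_pts = list(b_points)
--     if not a_pts or not b_pts:
--         return None
--     # axial -> transformed coords u = 2q + r, v = r: 4*delta = du**2 + 3*dv**2.
--     # Sort b by u; for each a, binary-search its u and expand outward in both
--     # directions, pruning each direction once du**2 >= current best.
--     bs = sorted(((2 * q + r, r) for (q, r) in b_pts), key=lambda t: t[0])
--     us = [t[0] for t in bs]
--     best = None
--     for (q, r) in a_pts: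
--         u, v = 2 * q + r, r
--         i = _bisect_left(us, u)
--         best = _scan(u, v, bs[:i][::-1], best)
--         best = _scan(u, v, bs[i:], best)
--     return best // 4
-- ===== Notes on version B (the rewrite author's own statement) =====
-- stated objective: faster
-- what changed: Instead of scanning all n*m pairs, B maps points to transformed coordinates u=2q+r, v=r (where 4*delta = du^2+3*dv^2), sorts the b-points by u once, and for each a-point binary-searches its u position and expands outward in both directions, pruning a direction as soon as the u-gap squared alone reaches the current best; finally divides the best 4*delta by 4.
import Mathlib
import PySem

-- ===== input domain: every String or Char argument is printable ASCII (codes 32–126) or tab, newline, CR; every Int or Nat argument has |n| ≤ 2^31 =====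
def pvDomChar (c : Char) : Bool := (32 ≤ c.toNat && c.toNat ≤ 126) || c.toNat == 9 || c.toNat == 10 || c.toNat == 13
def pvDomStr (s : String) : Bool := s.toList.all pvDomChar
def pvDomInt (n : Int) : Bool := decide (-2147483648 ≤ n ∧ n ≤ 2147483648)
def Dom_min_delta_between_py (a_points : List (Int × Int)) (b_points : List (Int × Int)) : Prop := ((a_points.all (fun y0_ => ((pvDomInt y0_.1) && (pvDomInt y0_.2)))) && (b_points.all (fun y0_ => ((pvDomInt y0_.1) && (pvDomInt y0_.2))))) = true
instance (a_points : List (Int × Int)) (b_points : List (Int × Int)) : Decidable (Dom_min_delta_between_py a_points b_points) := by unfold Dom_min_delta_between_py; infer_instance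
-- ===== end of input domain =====

-- B replaces A's all-pairs double loop by the transform u=2q+r, v=r (4*delta = du^2+3*dv^2),
-- sorting b by u, binary-searching each a's u and expanding outward in both directions with
-- pruning once the u-gap alone reaches the current best; same return value on every input.

-- ===== PORT A =====
-- _delta(a, b)
def pyDelta (a : Int × Int) (b : Int × Int) : Int :=
  let dq := a.1 - b.1
  let dr := a.2 - b.2
  dq * dq + dq * dr + dr * dr

def min_delta_between_py (a_points : List (Int × Int)) (b_points : List (Int × Int)) : Option Int :=
  if a_points = [] ∨ b_points = [] then none
  else
    a_points.foldl (fun best a =>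
      b_points.foldl (fun best b =>
        let d := pyDelta a b
        match best with
        | none => some d
        | some m => some (min m d)) best) none

-- ===== PORT B =====
-- _scan(u, v, seq, best): walk seq, break once best is set and du*du >= best,
-- otherwise best = d4 if best is None or d4 < best
def altScan (u v : Int) : List (Int × Int) → Option Int → Option Int
  | [], best => best
  | (ub, vb) :: rest, best =>
    let du := ub - u
    match best with
    | some m =>
      if du * du ≥ m then some m          -- break
      else
        let dv := vb - v
        let d4 := du * du + 3 * (dv * dv)
        altScan u v rest (some (if d4 < m then d4 else m))
    | none =>
        let dv := vb - v
        let d4 := du * du + 3 * (dv * dv)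
        altScan u v rest (some d4)

-- Source B's hand-written _bisect_left IS the standard binary-search loop
-- (lo/hi halving, us[mid] < u test): PySem.List.bisectLeft is that exact loop.
def min_delta_between_py_alt (a_points : List (Int × Int)) (b_points : List (Int × Int)) : Option Int :=
  if a_points = [] ∨ b_points = [] then none
  else
    let bs := PySem.List.sorted (b_points.map (fun p => (2 * p.1 + p.2, p.2))) (fun t => t.1)
    let us := bs.map (fun t => t.1)
    let best := a_points.foldl (fun best p =>
      let u := 2 * p.1 + p.2
      let v := p.2
      let i := PySem.List.bisectLeft us u
      let best := altScan u v ((bs.take i).reverse) best   -- bs[:i][::-1]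
      altScan u v (bs.drop i) best) none                   -- bs[i:]
    -- `best // 4`; best is some whenever both lists are nonempty
    best.map (fun m => PySem.Int.floordiv m 4)

-- ===== PRECONDITION & SPEC =====
def Spec_min_delta_between_py (a_points : List (Int × Int)) (b_points : List (Int × Int)) (out : Option Int) : Prop := out = min_delta_between_py_alt a_points b_points
instance (a_points : List (Int × Int)) (b_points : List (Int × Int)) (out : Option Int) : Decidable (Spec_min_delta_between_py a_points b_points out) := by unfold Spec_min_delta_between_py; infer_instance

-- ===== CLAIM (what is proved, stated in full; the proofs are below) =====
def Claim_equal_min_delta_between_py : Prop := ∀ (a_points : List (Int × Int)) (b_points : List (Int × Int)), Dom_min_delta_between_py a_points b_points → Spec_min_delta_between_py a_points b_points (min_delta_between_py a_points b_points)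

-- ===== LEMMAS AND PROOFS =====

-- A's accumulator step
def optStep (best : Option Int) (d : Int) : Option Int :=
  match best with
  | none => some d
  | some m => some (min m d)

-- the 4*delta value B's scan computes for a transformed point b against (u, v)
def q4 (u v : Int) (b : Int × Int) : Int := (b.1 - u) * (b.1 - u) + 3 * ((b.2 - v) * (b.2 - v))

theorem optStep_right_comm (z : Option Int) (x y : Int) :
    optStep (optStep z x) y = optStep (optStep z y) x := by
  cases z <;> simp [optStep, min_assoc, min_comm x y]

theorem foldl_optStep_ge (l : List Int) (m : Int) (h : ∀ d ∈ l, m ≤ d) :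
    l.foldl optStep (some m) = some m := by
  induction l with
  | nil => rfl
  | cons d ds ih =>
    simp only [List.foldl_cons, optStep, min_eq_left (h d (by simp))]
    exact ih (fun x hx => h x (by simp [hx]))

-- the pruned scan computes the same fold as examining every element,
-- provided the u-gap squared is nondecreasing along seq
theorem altScan_eq (u v : Int) (seq : List (Int × Int)) (best : Option Int)
    (h : seq.Pairwise (fun x y => (x.1 - u) * (x.1 - u) ≤ (y.1 - u) * (y.1 - u))) :
    altScan u v seq best = (seq.map (q4 u v)).foldl optStep best := by
  induction seq generalizing best with
  | nil => rfl
  | cons x rest ih =>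
    obtain ⟨ux, vx⟩ := x
    have hpw := (List.pairwise_cons.mp h).1
    have htl := (List.pairwise_cons.mp h).2
    cases best with
    | none =>
      simp only [altScan, List.map_cons, List.foldl_cons, optStep]
      exact ih _ htl
    | some m =>
      by_cases hbr : (ux - u) * (ux - u) ≥ m
      · have hl : altScan u v ((ux, vx) :: rest) (some m) = some m := by
          simp [altScan, hbr]
        rw [hl]
        refine (foldl_optStep_ge _ m ?_).symm
        intro d hd
        simp only [List.map_cons, List.mem_cons, List.mem_map] at hd
        rcases hd with rfl | ⟨y, hy, rfl⟩
        · unfold q4; nlinarith [mul_self_nonneg (vx - v)]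
        · have := hpw y hy
          unfold q4; nlinarith [mul_self_nonneg (y.2 - v)]
      · have hmin : (if (ux - u) * (ux - u) + 3 * ((vx - v) * (vx - v)) < m
              then (ux - u) * (ux - u) + 3 * ((vx - v) * (vx - v)) else m)
            = min m ((ux - u) * (ux - u) + 3 * ((vx - v) * (vx - v))) := by
          rcases lt_or_ge ((ux - u) * (ux - u) + 3 * ((vx - v) * (vx - v))) m with h' | h'
          · simp [h', min_eq_right (le_of_lt h')]
          · simp [not_lt.mpr h', min_eq_left h']
        simp only [altScan, hbr, List.map_cons, List.foldl_cons, optStep, q4, hmin]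
        exact ih _ htl

-- generic: a nested fold is a fold over the flatMap
theorem foldl_flatMap' {α β γ : Type} (g : α → List β) (f : γ → β → γ) (l : List α) (init : γ) :
    (l.flatMap g).foldl f init = l.foldl (fun acc a => (g a).foldl f acc) init := by
  induction l generalizing init with
  | nil => rfl
  | cons a l ih => simp [List.flatMap_cons, List.foldl_append, ih]

theorem foldl_congr_mem' {α β : Type} {f g : β → α → β} (l : List α) (init : β)
    (h : ∀ acc a, a ∈ l → f acc a = g acc a) : l.foldl f init = l.foldl g init := by
  induction l generalizing init with
  | nil => rfl
  | cons a l ih =>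
    rw [List.foldl_cons, List.foldl_cons, h _ _ (by simp),
      ih _ (fun acc x hx => h acc x (by simp [hx]))]

-- scaling by 4 commutes with the min-fold
theorem foldl_optStep_scale (l : List Int) (o : Option Int) :
    (l.map (fun d => 4 * d)).foldl optStep (o.map (fun d => 4 * d))
      = (l.foldl optStep o).map (fun d => 4 * d) := by
  induction l generalizing o with
  | nil => rfl
  | cons d ds ih =>
    have hstep : optStep (o.map (fun d => 4 * d)) (4 * d) = (optStep o d).map (fun d => 4 * d) := by
      cases o with
      | none => rfl
      | some m =>
        simp only [Option.map_some, optStep, Option.some.injEq]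
        rcases le_total m d with h | h
        · rw [min_eq_left h, min_eq_left (by omega)]
        · rw [min_eq_right h, min_eq_right (by omega)]
    simpa [List.foldl_cons, hstep] using ih (optStep o d)

-- B's per-a step (bisect + two pruned scans) equals folding optStep over ALL of bs
theorem altStep_eq (u v : Int) (bs : List (Int × Int))
    (hs : bs.Pairwise (fun a b => a.1 ≤ b.1)) (best : Option Int) :
    (let us := bs.map (fun t => t.1)
     let i := PySem.List.bisectLeft us u
     altScan u v (bs.drop i) (altScan u v ((bs.take i).reverse) best))
      = (bs.map (q4 u v)).foldl optStep best := by
  have hus : (bs.map (fun t => t.1)).Pairwise (· ≤ ·) :=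
    hs.map _ (fun a b h => h)
  obtain ⟨hle, hlt, hge⟩ := PySem.List.bisectLeft_spec (bs.map (fun t => t.1)) u hus
  set i := PySem.List.bisectLeft (bs.map (fun t => t.1)) u with hi
  have hlen : (bs.map (fun t => t.1)).length = bs.length := by simp
  -- every element of the prefix has u-coordinate < u
  have hpre_lt : ∀ x ∈ bs.take i, x.1 < u := by
    intro x hx
    obtain ⟨k, hk, hxe⟩ := List.mem_iff_getElem.mp hx
    have hk' : k < bs.length := lt_of_lt_of_le hk (by simpa using List.length_take_le i bs)
    have hki : k < i := lt_of_lt_of_le hk (by simp [List.length_take])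
    have := hlt k (by omega) hki
    simpa [List.getElem_map, ← hxe, List.getElem_take] using this
  -- every element of the suffix has u-coordinate ≥ u
  have hsuf_ge : ∀ x ∈ bs.drop i, u ≤ x.1 := by
    intro x hx
    obtain ⟨k, hk, hxe⟩ := List.mem_iff_getElem.mp hx
    have hk' : i + k < bs.length := by
      have := List.length_drop (l := bs) (i := i); omega
    have := hge (i + k) (by omega) (Nat.le_add_right _ _)
    simpa [List.getElem_map, ← hxe, List.getElem_drop] using this
  -- pruned-scan monotonicity hypotheses
  have hpre : ((bs.take i).reverse).Pairwise
      (fun x y => (x.1 - u) * (x.1 - u) ≤ (y.1 - u) * (y.1 - u)) := by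
    rw [List.pairwise_reverse]
    refine List.Pairwise.imp_of_mem ?_ (List.Pairwise.sublist (List.take_sublist i bs) hs)
    intro a b ha hb hab
    have h1 := hpre_lt a ha
    have h2 := hpre_lt b hb
    nlinarith
  have hsuf : (bs.drop i).Pairwise
      (fun x y => (x.1 - u) * (x.1 - u) ≤ (y.1 - u) * (y.1 - u)) := by
    refine List.Pairwise.imp_of_mem ?_ (List.Pairwise.sublist (List.drop_sublist i bs) hs)
    intro a b ha hb hab
    have h1 := hsuf_ge a ha
    have h2 := hsuf_ge b hb
    nlinarith
  -- rewrite both scans as plain folds, merge, and permute back to bs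
  simp only [← hi]
  rw [altScan_eq u v _ _ hpre, altScan_eq u v _ _ hsuf, ← List.foldl_append,
    ← List.map_append]
  have hperm : (((bs.take i).reverse ++ bs.drop i).map (q4 u v)).Perm (bs.map (q4 u v)) := by
    refine List.Perm.map _ ?_
    calc ((bs.take i).reverse ++ bs.drop i).Perm (bs.take i ++ bs.drop i) :=
          (List.reverse_perm _).append_right _
      _ = bs := List.take_append_drop i bs
  exact hperm.foldl_eq' (fun x _ y _ z => optStep_right_comm z x y) best

-- the transformed 4*delta is 4 times A's delta
theorem q4_transform (p b : Int × Int) :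
    q4 (2 * p.1 + p.2) p.2 (2 * b.1 + b.2, b.2) = 4 * pyDelta p b := by
  unfold q4 pyDelta; ring

-- ===== VERDICT (by name: the statement is the Claim_ definition above) =====
theorem min_delta_between_py_spec : Claim_equal_min_delta_between_py := by
  intro A B _
  unfold Spec_min_delta_between_py min_delta_between_py min_delta_between_py_alt
  by_cases h : A = [] ∨ B = []
  · simp [h]
  · simp only [h, if_false]
    -- A-side: fold over all pairs of pyDelta
    have hB : ∀ (a : Int × Int) (best : Option Int),
        B.foldl (fun best b =>
          let d := pyDelta a b
          match best with
          | none => some d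
          | some m => some (min m d)) best = (B.map (fun b => pyDelta a b)).foldl optStep best := by
      intro a best
      rw [List.foldl_map]
      rfl
    have hA : A.foldl (fun best a =>
        B.foldl (fun best b =>
          let d := pyDelta a b
          match best with
          | none => some d
          | some m => some (min m d)) best) none
        = (A.flatMap (fun a => B.map (fun b => pyDelta a b))).foldl optStep none := by
      rw [foldl_flatMap']
      exact foldl_congr_mem' A none (fun acc a _ => hB a acc)
    rw [hA]
    -- B-side
    set bs := PySem.List.sorted (B.map (fun p => (2 * p.1 + p.2, p.2))) (fun t => t.1) with hbs
    have hs : bs.Pairwise (fun a b => a.1 ≤ b.1) := PySem.List.sorted_pairwise _ _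
    have hstep : ∀ (best : Option Int) (p : Int × Int),
        (let u := 2 * p.1 + p.2
         let v := p.2
         let i := PySem.List.bisectLeft (bs.map (fun t => t.1)) u
         altScan u v (bs.drop i) (altScan u v ((bs.take i).reverse) best))
          = (B.map (fun b => 4 * pyDelta p b)).foldl optStep best := by
      intro best p
      rw [altStep_eq (2 * p.1 + p.2) p.2 bs hs best]
      have hperm : (bs.map (q4 (2 * p.1 + p.2) p.2)).Perm
          ((B.map (fun b => (2 * b.1 + b.2, b.2))).map (q4 (2 * p.1 + p.2) p.2)) :=
        List.Perm.map _ (PySem.List.sorted_perm _ _ _)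
      rw [hperm.foldl_eq' (fun x _ y _ z => optStep_right_comm z x y) best,
        List.map_map]
      refine congrArg (List.foldl optStep best) ?_
      simp only [Function.comp_def]
      exact List.map_congr_left (fun b _ => q4_transform p b)
    have hBfold : A.foldl (fun best p =>
        let u := 2 * p.1 + p.2
        let v := p.2
        let i := PySem.List.bisectLeft (bs.map (fun t => t.1)) u
        altScan u v (bs.drop i) (altScan u v ((bs.take i).reverse) best)) none
        = (A.flatMap (fun p => B.map (fun b => 4 * pyDelta p b))).foldl optStep none := by
      rw [foldl_flatMap']
      exact foldl_congr_mem' A none (fun acc p _ => hstep acc p)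
    simp only [hBfold]
    -- factor out the scaling by 4
    have hfac : A.flatMap (fun p => B.map (fun b => 4 * pyDelta p b))
        = (A.flatMap (fun p => B.map (fun b => pyDelta p b))).map (fun d => 4 * d) := by
      rw [List.map_flatMap]
      simp only [List.map_map, Function.comp_def]
    rw [hfac]
    have hscale := foldl_optStep_scale (A.flatMap (fun p => B.map (fun b => pyDelta p b))) none
    simp only [Option.map_none] at hscale
    rw [hscale, Option.map_map]
    -- floordiv (4*m) 4 = m
    cases (A.flatMap (fun p => B.map (fun b => pyDelta p b))).foldl optStep none with
    | none => rfl
    | some m =>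
      simp only [Option.map_some, Function.comp, Option.some.injEq]
      rw [PySem.Int.floordiv_eq_ediv_of_pos (by norm_num : (0:Int) < 4)]
      omega
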